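-- pv_equiv track=rewrite | github.com/pcw109550/write-up | 2020/CryptoCTF/Fatima/solve.py | revhelical_rev
-- ===== SOURCE A (Python) =====
-- def helical_rev(A):
--     B = [[0 for _ in range(len(A))] for _ in range(len(A))]
--     cnt = 0
--
--     row = len(A)
--     col = len(A[0])
--     tmp = []
--     dir = 0
--     for k in range(0, row):
--         if dir == 0:
--             i = k
--             for j in range(0, k+1):
--                 B[i][j] = A[cnt // len(A)][cnt % len(A)]
--                 cnt += 1
--                 i -= 1
--             dir = 1
--         else:
--             j = k
--             for i in range(0, k+1):
--                 B[i][j] = A[cnt // len(A)][cnt % len(A)]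
--                 cnt += 1
--                 j -= 1
--             dir = 0
--     for k in range(1, row):
--         if dir == 0:
--             i = row - 1
--             for j in range(k, row):
--                 B[i][j] = A[cnt // len(A)][cnt % len(A)]
--                 cnt += 1
--                 tmp.append(A[i][j])
--                 i -= 1
--             dir = 1
--         else:
--             j = row - 1
--             for i in range(k, row):
--                 B[i][j] = A[cnt // len(A)][cnt % len(A)]
--                 cnt += 1
--                 j -= 1
--             dir = 0
--     assert cnt == len(A) ** 2
--
--     return B
--
-- def revhelical_rev(A):
--     # FIXED
--     B = [[0 for _ in range(len(A))] for _ in range(len(A))]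
--     cnt = 0
--     for i in range(len(A)):
--         for j in range(len(A)):
--             B[cnt // len(A)][cnt % len(A)] = A[len(A) - 1 - i][len(A) - 1 - j]
--             cnt += 1
--     return helical_rev(B)
-- ===== SOURCE B (Python) =====
-- def revhelical_rev(A):
--     n = len(A)
--
--     def rank(i, j):
--         # closed-form position of cell (i, j) in the helical anti-diagonal write order
--         s = i + j
--         if s < n:
--             return s * (s + 1) // 2 + (j if s % 2 == 0 else i)
--         k = s - n + 1
--         base = n * (n + 1) // 2 + (k - 1) * n - (k - 1) * k // 2
--         return base + ((j - k) if s % 2 == 0 else (i - k))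
--
--     def cell(i, j):
--         r = rank(i, j)
--         return A[n - 1 - r // n][n - 1 - r % n]
--
--     return [[cell(i, j) for j in range(n)] for i in range(n)]
-- ===== Notes on version B (the rewrite author's own statement) =====
-- stated objective: alternative
-- what changed: B replaces the stateful zig-zag simulation (rotated intermediate matrix + helical_rev's direction-toggling write loops) by a closed-form rank formula: for each output cell (i,j) it computes that cell's position in the helical order directly via triangular-number arithmetic and reads A at the 180-rotated flat index, building the result row-major with no intermediate matrices or counters.
-- outside the precondition, e.g. on revhelical_rev([]): A raises IndexError, B returns []
import Mathlib
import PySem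

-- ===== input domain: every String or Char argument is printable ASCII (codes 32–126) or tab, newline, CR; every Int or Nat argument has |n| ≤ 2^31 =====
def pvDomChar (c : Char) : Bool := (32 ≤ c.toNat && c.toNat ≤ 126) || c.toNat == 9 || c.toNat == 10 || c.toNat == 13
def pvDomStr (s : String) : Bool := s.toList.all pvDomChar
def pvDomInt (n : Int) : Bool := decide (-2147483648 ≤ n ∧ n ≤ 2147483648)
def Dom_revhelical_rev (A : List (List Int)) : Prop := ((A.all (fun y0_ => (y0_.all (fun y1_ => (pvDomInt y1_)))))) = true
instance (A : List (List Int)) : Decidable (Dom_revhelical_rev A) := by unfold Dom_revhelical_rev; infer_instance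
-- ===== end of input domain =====

-- B replaces A's rotated intermediate matrix + stateful zig-zag writer by a closed-form
-- rank formula per output cell, read row-major (objective: alternative algorithm).

-- shared low-level helpers: in-range 2D read / write (all accesses are in range on Pre_)
def pvGet2 (M : List (List Int)) (i j : Nat) : Int := (M.getD i []).getD j 0
def pvSet2 (M : List (List Int)) (i j : Nat) (v : Int) : List (List Int) :=
  M.modify i (fun row => row.set j v)

-- ===== PORT A =====
-- helical_rev's inner loops: state (B, cnt, i-or-j); the moving index is an Int that
-- decrements, exactly as in the Python (writes convert with toNat; in range on Pre_)
def pvAInner0 (M : List (List Int)) (n : Nat) (js : List Nat)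
    (s : List (List Int) × Nat × Int) : List (List Int) × Nat × Int :=
  js.foldl (fun t j => (pvSet2 t.1 t.2.2.toNat j (pvGet2 M (t.2.1 / n) (t.2.1 % n)), t.2.1 + 1, t.2.2 - 1)) s
def pvAInner1 (M : List (List Int)) (n : Nat) (is : List Nat)
    (s : List (List Int) × Nat × Int) : List (List Int) × Nat × Int :=
  is.foldl (fun t i => (pvSet2 t.1 i t.2.2.toNat (pvGet2 M (t.2.1 / n) (t.2.1 % n)), t.2.1 + 1, t.2.2 - 1)) s

-- the two outer loops of helical_rev; state (B, cnt, dir); the dead 'tmp' list is dropped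
def pvAOut1 (M : List (List Int)) (n : Nat) (s : List (List Int) × Nat × Nat) (k : Nat) :
    List (List Int) × Nat × Nat :=
  if s.2.2 = 0 then
    let t := pvAInner0 M n (List.range (k+1)) (s.1, s.2.1, (k : Int)); (t.1, t.2.1, 1)
  else
    let t := pvAInner1 M n (List.range (k+1)) (s.1, s.2.1, (k : Int)); (t.1, t.2.1, 0)
def pvAOut2 (M : List (List Int)) (n : Nat) (s : List (List Int) × Nat × Nat) (k : Nat) :
    List (List Int) × Nat × Nat :=
  if s.2.2 = 0 then
    let t := pvAInner0 M n (List.range' k (n-k)) (s.1, s.2.1, (n : Int) - 1); (t.1, t.2.1, 1)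
  else
    let t := pvAInner1 M n (List.range' k (n-k)) (s.1, s.2.1, (n : Int) - 1); (t.1, t.2.1, 0)

def pvAHelical (M : List (List Int)) : List (List Int) :=
  let n := M.length
  ((List.range' 1 (n-1)).foldl (pvAOut2 M n)
    ((List.range n).foldl (pvAOut1 M n) (List.replicate n (List.replicate n 0), 0, 0))).1

-- the rotation loop of revhelical_rev: B[cnt//n][cnt%n] = A[n-1-i][n-1-j]
def pvBuildRot (A : List (List Int)) : List (List Int) × Nat :=
  let n := A.length
  (List.range n).foldl (fun s i =>
      (List.range n).foldl (fun t j =>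
          (pvSet2 t.1 (t.2 / n) (t.2 % n) (pvGet2 A (n-1-i) (n-1-j)), t.2 + 1)) s)
    (List.replicate n (List.replicate n 0), 0)

def revhelical_rev (A : List (List Int)) : List (List Int) :=
  pvAHelical (pvBuildRot A).1

-- ===== PORT B =====
-- Source B's rank(i, j): closed-form position of cell (i, j) in the helical write order
def pvRank (n i j : Nat) : Nat :=
  let s := i + j
  if s < n then
    s * (s + 1) / 2 + (if s % 2 = 0 then j else i)
  else
    let k := s - n + 1
    n * (n + 1) / 2 + (k - 1) * n - (k - 1) * k / 2 + (if s % 2 = 0 then j - k else i - k)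

-- Source B's cell(i, j)
def pvCell (A : List (List Int)) (n i j : Nat) : Int :=
  let r := pvRank n i j
  pvGet2 A (n - 1 - r / n) (n - 1 - r % n)

def revhelical_rev_alt (A : List (List Int)) : List (List Int) :=
  let n := A.length
  (List.range n).map fun i => (List.range n).map fun j => pvCell A n i j

-- ===== PRECONDITION & SPEC =====
-- Pre_: exactly where the Python A returns: it raises IndexError on [] (len(A[0]))
-- and whenever some row is shorter than len(A) (reads A[r][c] for all r,c < len(A)).
def Pre_revhelical_rev (A : List (List Int)) : Prop :=
  A ≠ [] ∧ ∀ r ∈ A, A.length ≤ r.length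
instance (A : List (List Int)) : Decidable (Pre_revhelical_rev A) := by
  unfold Pre_revhelical_rev; infer_instance
def pvWitness_revhelical_rev : List (List Int) := [[1, 2], [3, 4]]

def Spec_revhelical_rev (A : List (List Int)) (out : List (List Int)) : Prop :=
  out = revhelical_rev_alt A
instance (A : List (List Int)) (out : List (List Int)) : Decidable (Spec_revhelical_rev A out) := by
  unfold Spec_revhelical_rev; infer_instance

-- ===== CLAIM =====
def Claim_equal_revhelical_rev : Prop :=
  ∀ (A : List (List Int)), Dom_revhelical_rev A → Pre_revhelical_rev A →
    Spec_revhelical_rev A (revhelical_rev A)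

-- ===== LEMMAS AND PROOFS =====

-- A-side normal form: the helical writer as a fold over an explicit coordinate path
def pvSeg0 (k : Nat) : List (Nat × Nat) := (List.range (k+1)).map fun j => (k - j, j)
def pvSeg1 (k : Nat) : List (Nat × Nat) := (List.range (k+1)).map fun i => (i, k - i)
def pvSeg2 (n k : Nat) : List (Nat × Nat) := (List.range' k (n-k)).map fun j => (n-1-(j-k), j)
def pvSeg3 (n k : Nat) : List (Nat × Nat) := (List.range' k (n-k)).map fun i => (i, n-1-(i-k))

def pvPStep1 (s : List (Nat × Nat) × Nat) (k : Nat) : List (Nat × Nat) × Nat :=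
  if s.2 = 0 then (s.1 ++ pvSeg0 k, 1) else (s.1 ++ pvSeg1 k, 0)
def pvPStep2 (n : Nat) (s : List (Nat × Nat) × Nat) (k : Nat) : List (Nat × Nat) × Nat :=
  if s.2 = 0 then (s.1 ++ pvSeg2 n k, 1) else (s.1 ++ pvSeg3 n k, 0)

def pvPath (n : Nat) : List (Nat × Nat) :=
  ((List.range' 1 (n-1)).foldl (pvPStep2 n) ((List.range n).foldl pvPStep1 ([], 0))).1

-- the canonical write fold: write along coordinate list ps, reading M flat at the counter
def wfold (M : List (List Int)) (n : Nat) (ps : List (Nat × Nat))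
    (s : List (List Int) × Nat) : List (List Int) × Nat :=
  ps.foldl (fun s p => (pvSet2 s.1 p.1 p.2 (pvGet2 M (s.2 / n) (s.2 % n)), s.2 + 1)) s

-- the same fold reading A at the 180-rotated flat counter
def wfoldR (A : List (List Int)) (n : Nat) (ps : List (Nat × Nat))
    (s : List (List Int) × Nat) : List (List Int) × Nat :=
  ps.foldl (fun s p => (pvSet2 s.1 p.1 p.2 (pvGet2 A (n-1 - s.2 / n) (n-1 - s.2 % n)), s.2 + 1)) s

theorem wfold_append (M : List (List Int)) (n : Nat) (ps qs : List (Nat × Nat)) (s) :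
    wfold M n (ps ++ qs) s = wfold M n qs (wfold M n ps s) := by
  simp [wfold, List.foldl_append]

theorem L0 (M : List (List Int)) (n : Nat) :
    ∀ (m a c : Nat) (i0 : Int) (B : List (List Int)),
      pvAInner0 M n (List.range' a m) (B, c, i0) =
        ((wfold M n ((List.range m).map fun (t : Nat) => ((i0 - (t:Int)).toNat, a + t)) (B, c)).1,
         (wfold M n ((List.range m).map fun (t : Nat) => ((i0 - (t:Int)).toNat, a + t)) (B, c)).2,
         i0 - m) := by
  intro m
  induction m with
  | zero => intro a c i0 B; simp [pvAInner0, wfold]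
  | succ m ih =>
    intro a c i0 B
    rw [List.range'_succ]
    have hstep : pvAInner0 M n (a :: List.range' (a+1) m) (B, c, i0) =
        pvAInner0 M n (List.range' (a+1) m)
          (pvSet2 B i0.toNat a (pvGet2 M (c / n) (c % n)), c + 1, i0 - 1) := by
      simp [pvAInner0]
    rw [hstep, ih]
    have hmap : ((List.range (m+1)).map fun (t : Nat) => ((i0 - (t:Int)).toNat, a + t)) =
        (i0.toNat, a) :: ((List.range m).map fun (t : Nat) => (((i0 - 1) - (t:Int)).toNat, (a+1) + t)) := by
      rw [List.range_succ_eq_map, List.map_cons, List.map_map]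
      refine List.cons_eq_cons.mpr ⟨by simp, ?_⟩
      apply List.map_congr_left
      intro t _
      simp only [Function.comp]
      refine Prod.ext ?_ ?_ <;> · push_cast; try omega
    rw [hmap]
    have hw : wfold M n ((i0.toNat, a) ::
        ((List.range m).map fun (t : Nat) => (((i0 - 1) - (t:Int)).toNat, (a+1) + t))) (B, c) =
        wfold M n ((List.range m).map fun (t : Nat) => (((i0 - 1) - (t:Int)).toNat, (a+1) + t))
          (pvSet2 B i0.toNat a (pvGet2 M (c / n) (c % n)), c + 1) := by
      simp [wfold]
    rw [hw]
    refine Prod.ext rfl (Prod.ext rfl ?_)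
    push_cast
    ring

theorem L1 (M : List (List Int)) (n : Nat) :
    ∀ (m a c : Nat) (j0 : Int) (B : List (List Int)),
      pvAInner1 M n (List.range' a m) (B, c, j0) =
        ((wfold M n ((List.range m).map fun (t : Nat) => (a + t, (j0 - (t:Int)).toNat)) (B, c)).1,
         (wfold M n ((List.range m).map fun (t : Nat) => (a + t, (j0 - (t:Int)).toNat)) (B, c)).2,
         j0 - m) := by
  intro m
  induction m with
  | zero => intro a c j0 B; simp [pvAInner1, wfold]
  | succ m ih =>
    intro a c j0 B
    rw [List.range'_succ]
    have hstep : pvAInner1 M n (a :: List.range' (a+1) m) (B, c, j0) =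
        pvAInner1 M n (List.range' (a+1) m)
          (pvSet2 B a j0.toNat (pvGet2 M (c / n) (c % n)), c + 1, j0 - 1) := by
      simp [pvAInner1]
    rw [hstep, ih]
    have hmap : ((List.range (m+1)).map fun (t : Nat) => (a + t, (j0 - (t:Int)).toNat)) =
        (a, j0.toNat) :: ((List.range m).map fun (t : Nat) => ((a+1) + t, ((j0 - 1) - (t:Int)).toNat)) := by
      rw [List.range_succ_eq_map, List.map_cons, List.map_map]
      refine List.cons_eq_cons.mpr ⟨by simp, ?_⟩
      apply List.map_congr_left
      intro t _
      simp only [Function.comp]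
      refine Prod.ext ?_ ?_ <;> · push_cast; try omega
    rw [hmap]
    have hw : wfold M n ((a, j0.toNat) ::
        ((List.range m).map fun (t : Nat) => ((a+1) + t, ((j0 - 1) - (t:Int)).toNat))) (B, c) =
        wfold M n ((List.range m).map fun (t : Nat) => ((a+1) + t, ((j0 - 1) - (t:Int)).toNat))
          (pvSet2 B a j0.toNat (pvGet2 M (c / n) (c % n)), c + 1) := by
      simp [wfold]
    rw [hw]
    refine Prod.ext rfl (Prod.ext rfl ?_)
    push_cast
    ring

theorem seg0_eq (k : Nat) :
    ((List.range (k+1)).map fun (t : Nat) => (((k : Int) - (t:Int)).toNat, 0 + t)) = pvSeg0 k := by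
  unfold pvSeg0
  apply List.map_congr_left
  intro t _
  refine Prod.ext ?_ (by omega)
  simp only []
  omega
theorem seg1_eq (k : Nat) :
    ((List.range (k+1)).map fun (t : Nat) => (0 + t, ((k : Int) - (t:Int)).toNat)) = pvSeg1 k := by
  unfold pvSeg1
  apply List.map_congr_left
  intro t _
  refine Prod.ext (by omega) ?_
  simp only []
  omega
theorem seg2_eq (n k : Nat) :
    ((List.range (n-k)).map fun (t : Nat) => ((((n : Int) - 1) - (t:Int)).toNat, k + t)) = pvSeg2 n k := by
  unfold pvSeg2
  rw [List.range'_eq_map_range, List.map_map]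
  apply List.map_congr_left
  intro t _
  refine Prod.ext ?_ (by simp)
  simp only [Function.comp]
  omega
theorem seg3_eq (n k : Nat) :
    ((List.range (n-k)).map fun (t : Nat) => (k + t, (((n : Int) - 1) - (t:Int)).toNat)) = pvSeg3 n k := by
  unfold pvSeg3
  rw [List.range'_eq_map_range, List.map_map]
  apply List.map_congr_left
  intro t _
  refine Prod.ext (by simp) ?_
  simp only [Function.comp]
  omega

-- path accumulator lemmas
theorem pacc1 : ∀ (ks : List Nat) (p : List (Nat × Nat)) (d : Nat),
    ks.foldl pvPStep1 (p, d) =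
      (p ++ (ks.foldl pvPStep1 ([], d)).1, (ks.foldl pvPStep1 ([], d)).2) := by
  intro ks
  induction ks with
  | nil => intro p d; simp
  | cons k ks ih =>
    intro p d
    by_cases hd : d = 0
    · simp only [List.foldl_cons, pvPStep1, hd, reduceIte]
      rw [ih (p ++ pvSeg0 k) 1, ih ([] ++ pvSeg0 k) 1]
      simp
    · simp only [List.foldl_cons, pvPStep1, hd, reduceIte]
      rw [ih (p ++ pvSeg1 k) 0, ih ([] ++ pvSeg1 k) 0]
      simp
theorem pacc2 (n : Nat) : ∀ (ks : List Nat) (p : List (Nat × Nat)) (d : Nat),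
    ks.foldl (pvPStep2 n) (p, d) =
      (p ++ (ks.foldl (pvPStep2 n) ([], d)).1, (ks.foldl (pvPStep2 n) ([], d)).2) := by
  intro ks
  induction ks with
  | nil => intro p d; simp
  | cons k ks ih =>
    intro p d
    by_cases hd : d = 0
    · simp only [List.foldl_cons, pvPStep2, hd, reduceIte]
      rw [ih (p ++ pvSeg2 n k) 1, ih ([] ++ pvSeg2 n k) 1]
      simp
    · simp only [List.foldl_cons, pvPStep2, hd, reduceIte]
      rw [ih (p ++ pvSeg3 n k) 0, ih ([] ++ pvSeg3 n k) 0]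
      simp

theorem outer1 (M : List (List Int)) (n : Nat) :
    ∀ (ks : List Nat) (B : List (List Int)) (c d : Nat), d = 0 ∨ d = 1 →
      ks.foldl (pvAOut1 M n) (B, c, d) =
        ((wfold M n (ks.foldl pvPStep1 ([], d)).1 (B, c)).1,
         (wfold M n (ks.foldl pvPStep1 ([], d)).1 (B, c)).2,
         (ks.foldl pvPStep1 ([], d)).2) := by
  intro ks
  induction ks with
  | nil => intro B c d _; simp [wfold]
  | cons k ks ih =>
    intro B c d hd
    rw [List.foldl_cons, List.foldl_cons]
    rcases hd with hd | hd <;> subst hd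
    · have h1 : pvAOut1 M n (B, c, 0) k =
          ((wfold M n (pvSeg0 k) (B, c)).1, (wfold M n (pvSeg0 k) (B, c)).2, 1) := by
        simp only [pvAOut1]
        simp only [if_true]
        rw [show List.range (k+1) = List.range' 0 (k+1) by simp [List.range_eq_range'], L0, seg0_eq]
      rw [h1, ih _ _ 1 (Or.inr rfl), show pvPStep1 ([], 0) k = ([] ++ pvSeg0 k, 1) from rfl,
        pacc1 ks ([] ++ pvSeg0 k) 1]
      simp [wfold_append]
    · have h1 : pvAOut1 M n (B, c, 1) k =
          ((wfold M n (pvSeg1 k) (B, c)).1, (wfold M n (pvSeg1 k) (B, c)).2, 0) := by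
        simp only [pvAOut1, if_true, if_false]
        rw [show List.range (k+1) = List.range' 0 (k+1) by simp [List.range_eq_range'], L1, seg1_eq]
        norm_num
      rw [h1, ih _ _ 0 (Or.inl rfl), show pvPStep1 ([], 1) k = ([] ++ pvSeg1 k, 0) from rfl,
        pacc1 ks ([] ++ pvSeg1 k) 0]
      simp [wfold_append]

theorem outer2 (M : List (List Int)) (n : Nat) :
    ∀ (ks : List Nat) (B : List (List Int)) (c d : Nat), d = 0 ∨ d = 1 →
      ks.foldl (pvAOut2 M n) (B, c, d) =
        ((wfold M n (ks.foldl (pvPStep2 n) ([], d)).1 (B, c)).1,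
         (wfold M n (ks.foldl (pvPStep2 n) ([], d)).1 (B, c)).2,
         (ks.foldl (pvPStep2 n) ([], d)).2) := by
  intro ks
  induction ks with
  | nil => intro B c d _; simp [wfold]
  | cons k ks ih =>
    intro B c d hd
    rw [List.foldl_cons, List.foldl_cons]
    rcases hd with hd | hd <;> subst hd
    · have h1 : pvAOut2 M n (B, c, 0) k =
          ((wfold M n (pvSeg2 n k) (B, c)).1, (wfold M n (pvSeg2 n k) (B, c)).2, 1) := by
        simp only [pvAOut2]
        simp only [if_true]
        rw [L0, seg2_eq]
      rw [h1, ih _ _ 1 (Or.inr rfl), show pvPStep2 n ([], 0) k = ([] ++ pvSeg2 n k, 1) from rfl,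
        pacc2 n ks ([] ++ pvSeg2 n k) 1]
      simp [wfold_append]
    · have h1 : pvAOut2 M n (B, c, 1) k =
          ((wfold M n (pvSeg3 n k) (B, c)).1, (wfold M n (pvSeg3 n k) (B, c)).2, 0) := by
        simp only [pvAOut2, if_true, if_false]
        rw [L1, seg3_eq]
        norm_num
      rw [h1, ih _ _ 0 (Or.inl rfl), show pvPStep2 n ([], 1) k = ([] ++ pvSeg3 n k, 0) from rfl,
        pacc2 n ks ([] ++ pvSeg3 n k) 0]
      simp [wfold_append]

theorem dir1_cases : ∀ (ks : List Nat) (d : Nat), d = 0 ∨ d = 1 →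
    (ks.foldl pvPStep1 ([], d)).2 = 0 ∨ (ks.foldl pvPStep1 ([], d)).2 = 1 := by
  intro ks
  induction ks with
  | nil => intro d h; simpa using h
  | cons k ks ih =>
    intro d h
    rw [List.foldl_cons, pacc1]
    rcases h with h | h <;> simp only [pvPStep1, h, reduceIte] <;>
      [exact ih 1 (Or.inr rfl); exact ih 0 (Or.inl rfl)]

theorem helical_eq_wfold (M : List (List Int)) :
    pvAHelical M = (wfold M M.length (pvPath M.length)
      (List.replicate M.length (List.replicate M.length 0), 0)).1 := by
  simp only [pvAHelical, pvPath]
  rw [outer1 M M.length (List.range M.length) _ 0 0 (Or.inl rfl)]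
  rw [outer2 M M.length (List.range' 1 (M.length - 1)) _ _ _
    (dir1_cases (List.range M.length) 0 (Or.inl rfl))]
  conv_rhs => rw [← Prod.mk.eta (p := List.foldl pvPStep1 ([], 0) (List.range M.length))]
  rw [pacc2 M.length (List.range' 1 (M.length - 1))
    (List.foldl pvPStep1 ([], 0) (List.range M.length)).1
    (List.foldl pvPStep1 ([], 0) (List.range M.length)).2]
  rw [wfold_append]

-- reads agree ⇒ the two folds agree
theorem wfold_eq_wfoldR (M A : List (List Int)) (n : Nat) :
    ∀ (ps : List (Nat × Nat)) (B : List (List Int)) (c : Nat),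
      (∀ t, c ≤ t → t < c + ps.length →
        pvGet2 M (t / n) (t % n) = pvGet2 A (n-1 - t / n) (n-1 - t % n)) →
      wfold M n ps (B, c) = wfoldR A n ps (B, c) := by
  intro ps
  induction ps with
  | nil => intro B c _; rfl
  | cons p ps ih =>
    intro B c hread
    have h0 : pvGet2 M (c / n) (c % n) = pvGet2 A (n-1 - c / n) (n-1 - c % n) :=
      hread c le_rfl (by simp only [List.length_cons]; omega)
    simp only [wfold, wfoldR, List.foldl_cons, h0]
    have := ih (pvSet2 B p.1 p.2 (pvGet2 A (n-1 - c / n) (n-1 - c % n))) (c+1)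
      (fun t h1 h2 => hread t (by omega) (by simp only [List.length_cons]; omega))
    simpa [wfold, wfoldR] using this

-- pvGet2 / shape through pvSet2
theorem len_set2 (B : List (List Int)) (i j : Nat) (v : Int) :
    (pvSet2 B i j v).length = B.length := by
  simp [pvSet2]

theorem rowlen_set2 (B : List (List Int)) (i j : Nat) (v : Int) (r : Nat) :
    ((pvSet2 B i j v).getD r []).length = (B.getD r []).length := by
  simp only [pvSet2, List.getD_eq_getElem?_getD, List.getElem?_modify]
  by_cases h : i = r <;> simp [h] <;> cases B[r]? <;> simp

theorem get2_set2_self (B : List (List Int)) (i j : Nat) (v : Int)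
    (h1 : i < B.length) (h2 : j < (B.getD i []).length) :
    pvGet2 (pvSet2 B i j v) i j = v := by
  obtain ⟨row, hrow, h2'⟩ : ∃ row, B[i]? = some row ∧ j < row.length := by
    refine ⟨B[i], by simp [List.getElem?_eq_getElem h1], ?_⟩
    rwa [List.getD_eq_getElem?_getD, List.getElem?_eq_getElem h1] at h2
  simp only [pvGet2, pvSet2, List.getD_eq_getElem?_getD, List.getElem?_modify, hrow,
    if_pos rfl, Option.map_some, Option.getD_some]
  simp [List.getElem?_set, h2']

theorem get2_set2_ne (B : List (List Int)) (i j : Nat) (v : Int) (r c : Nat)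
    (h : r ≠ i ∨ c ≠ j) :
    pvGet2 (pvSet2 B i j v) r c = pvGet2 B r c := by
  rcases h with h | h
  · simp only [pvGet2, pvSet2, List.getD_eq_getElem?_getD, List.getElem?_modify]
    simp [show ¬ (i = r) from fun e => h e.symm]
  · simp only [pvGet2, pvSet2, List.getD_eq_getElem?_getD, List.getElem?_modify]
    by_cases hir : i = r
    · subst hir
      cases hB : B[i]? with
      | none => simp
      | some row => simp [show j ≠ c from fun e => h e.symm]
    · simp [hir]

-- characterisation of the rotation matrix built by A
def rotInnerStep (A : List (List Int)) (n i : Nat) (t : List (List Int) × Nat) (j : Nat) :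
    List (List Int) × Nat :=
  (pvSet2 t.1 (t.2 / n) (t.2 % n) (pvGet2 A (n-1-i) (n-1-j)), t.2 + 1)
def rotOuterStep (A : List (List Int)) (n : Nat) (s : List (List Int) × Nat) (i : Nat) :
    List (List Int) × Nat :=
  (List.range n).foldl (rotInnerStep A n i) s

theorem rot_inner (A : List (List Int)) (n : Nat) (hn : 1 ≤ n) (i : Nat) (hi : i < n) :
    ∀ (jm : Nat), jm ≤ n → ∀ (B : List (List Int)), B.length = n →
      (∀ r, r < n → (B.getD r []).length = n) →
      ((List.range jm).foldl (rotInnerStep A n i) (B, i*n)).2 = i*n + jm ∧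
      ((List.range jm).foldl (rotInnerStep A n i) (B, i*n)).1.length = n ∧
      (∀ r, r < n →
        ((((List.range jm).foldl (rotInnerStep A n i) (B, i*n)).1).getD r []).length = n) ∧
      (∀ r c, pvGet2 ((List.range jm).foldl (rotInnerStep A n i) (B, i*n)).1 r c =
        if r = i ∧ c < jm then pvGet2 A (n-1-i) (n-1-c) else pvGet2 B r c) := by
  intro jm
  induction jm with
  | zero =>
    intro _ B hB hrow
    refine ⟨by simp, by simpa using hB, fun r hr => by simpa using hrow r hr,
      fun r c => by simp⟩
  | succ jm ih =>
    intro hjm B hB hrow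
    obtain ⟨ih1, ih2, ih3, ih4⟩ := ih (by omega) B hB hrow
    set R := (List.range jm).foldl (rotInnerStep A n i) (B, i*n) with hR
    have hstep : (List.range (jm+1)).foldl (rotInnerStep A n i) (B, i*n) =
        rotInnerStep A n i R jm := by
      rw [List.range_succ, List.foldl_append, List.foldl_cons, List.foldl_nil]
    have hdiv : R.2 / n = i := by
      rw [ih1, mul_comm, Nat.mul_add_div (by omega : 0 < n), Nat.div_eq_of_lt (by omega)]
      omega
    have hmod : R.2 % n = jm := by
      rw [ih1, mul_comm, Nat.mul_add_mod, Nat.mod_eq_of_lt (by omega)]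
    rw [hstep]
    simp only [rotInnerStep, hdiv, hmod]
    refine ⟨by simp [ih1]; omega, by simp [len_set2, ih2],
      fun r hr => by rw [rowlen_set2]; exact ih3 r hr, ?_⟩
    intro r c
    by_cases hrc : r = i ∧ c = jm
    · rw [hrc.1, hrc.2, get2_set2_self _ _ _ _ (by omega) (by rw [ih3 i hi]; omega),
        if_pos ⟨rfl, by omega⟩]
    · have hne : r ≠ i ∨ c ≠ jm := by tauto
      rw [get2_set2_ne _ _ _ _ _ _ hne, ih4 r c]
      by_cases h1 : r = i ∧ c < jm
      · simp [h1.1, h1.2, show c < jm + 1 by omega]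
      · have h2 : ¬ (r = i ∧ c < jm + 1) := by
          rcases hne with h | h
          · tauto
          · rintro ⟨hr, hc⟩; exact (by tauto : ¬ (r = i ∧ c < jm)) ⟨hr, by omega⟩
        rw [if_neg h1, if_neg h2]

theorem rot_outer (A : List (List Int)) (n : Nat) (hn : 1 ≤ n) (hAn : A.length = n) :
    ∀ (im : Nat), im ≤ n →
      (((List.range im).foldl (rotOuterStep A n)
          (List.replicate n (List.replicate n 0), 0)).2 = im*n) ∧
      (((List.range im).foldl (rotOuterStep A n)
          (List.replicate n (List.replicate n 0), 0)).1.length = n) ∧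
      (∀ r, r < n →
        ((((List.range im).foldl (rotOuterStep A n)
            (List.replicate n (List.replicate n 0), 0)).1).getD r []).length = n) ∧
      (∀ r c, pvGet2 ((List.range im).foldl (rotOuterStep A n)
            (List.replicate n (List.replicate n 0), 0)).1 r c =
        if r < im ∧ c < n then pvGet2 A (n-1-r) (n-1-c) else 0) := by
  intro im
  induction im with
  | zero =>
    intro _
    refine ⟨by simp, by simp, fun r hr => by simp [List.getD_eq_getElem?_getD,
      List.getElem?_replicate, hr], fun r c => ?_⟩
    simp only [List.foldl_nil, if_neg (by omega : ¬ (r < 0 ∧ c < n))]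
    simp only [pvGet2, List.getD_eq_getElem?_getD, List.getElem?_replicate]
    by_cases hr : r < n <;> by_cases hc : c < n <;> simp [hr, hc]
  | succ im ih =>
    intro him
    obtain ⟨ih1, ih2, ih3, ih4⟩ := ih (by omega)
    set S := (List.range im).foldl (rotOuterStep A n)
      (List.replicate n (List.replicate n 0), 0) with hS
    have hstep : (List.range (im+1)).foldl (rotOuterStep A n)
        (List.replicate n (List.replicate n 0), 0) = rotOuterStep A n S im := by
      rw [List.range_succ, List.foldl_append, List.foldl_cons, List.foldl_nil]
    have hSeta : S = (S.1, S.2) := rfl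
    obtain ⟨r1, r2, r3, r4⟩ :=
      rot_inner A n hn im (by omega) n le_rfl S.1 ih2 ih3
    rw [hstep]
    have hfold : rotOuterStep A n S im =
        (List.range n).foldl (rotInnerStep A n im) (S.1, im*n) := by
      rw [rotOuterStep, hSeta, ih1]
    rw [hfold]
    refine ⟨by rw [r1]; ring, r2, r3, fun r c => ?_⟩
    rw [r4 r c, ih4 r c]
    by_cases h1 : r = im ∧ c < n
    · simp [h1.1, h1.2, show im < im + 1 by omega]
    · rw [if_neg h1]
      by_cases h2 : r < im ∧ c < n
      · simp [h2.1, h2.2, show r < im + 1 by omega]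
      · rw [if_neg h2, if_neg (by omega : ¬ (r < im + 1 ∧ c < n))]

theorem buildRot_read (A : List (List Int)) (h : 1 ≤ A.length) :
    ∀ t, t < A.length * A.length →
      pvGet2 (pvBuildRot A).1 (t / A.length) (t % A.length) =
      pvGet2 A (A.length - 1 - t / A.length) (A.length - 1 - t % A.length) := by
  intro t ht
  have h1 := (rot_outer A A.length h rfl A.length le_rfl).2.2.2 (t / A.length) (t % A.length)
  have hdiv : t / A.length < A.length := Nat.div_lt_of_lt_mul ht
  have hmod : t % A.length < A.length := Nat.mod_lt _ (by omega)
  rw [show pvBuildRot A =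
      (List.range A.length).foldl (rotOuterStep A A.length)
        (List.replicate A.length (List.replicate A.length 0), 0) from rfl]
  rw [h1, if_pos ⟨hdiv, hmod⟩]

theorem buildRot_len (A : List (List Int)) (h : 1 ≤ A.length) :
    (pvBuildRot A).1.length = A.length := by
  have h1 := (rot_outer A A.length h rfl A.length le_rfl).2.1
  rw [show pvBuildRot A =
      (List.range A.length).foldl (rotOuterStep A A.length)
        (List.replicate A.length (List.replicate A.length 0), 0) from rfl]
  exact h1

-- =========== NEW: the path as a flat list of anti-diagonal segments ===========

-- the diagonal-s segment of the helical path (parity s decides the direction)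
def pvDiag (n s : Nat) : List (Nat × Nat) :=
  if s < n then
    if s % 2 = 0 then (List.range (s+1)).map (fun j => (s - j, j))
    else (List.range (s+1)).map (fun i => (i, s - i))
  else
    let k := s - n + 1
    if s % 2 = 0 then (List.range' k (n-k)).map (fun j => (n - 1 - (j - k), j))
    else (List.range' k (n-k)).map (fun i => (i, n - 1 - (i - k)))

def pvDlen (n s : Nat) : Nat := if s < n then s + 1 else n - (s - n + 1)

def pvBase (n s : Nat) : Nat := ((List.range s).map (pvDlen n)).sum

theorem diag_length (n s : Nat) : (pvDiag n s).length = pvDlen n s := by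
  unfold pvDiag pvDlen
  split_ifs <;> simp

theorem fold1_flat (n : Nat) : ∀ m, m ≤ n →
    (List.range m).foldl pvPStep1 ([], 0) = ((List.range m).flatMap (pvDiag n), m % 2) := by
  intro m
  induction m with
  | zero => intro _; simp
  | succ m ih =>
    intro hm
    rw [List.range_succ, List.foldl_append, ih (by omega), List.foldl_cons, List.foldl_nil,
      List.flatMap_append, List.flatMap_cons, List.flatMap_nil, List.append_nil]
    by_cases hp : m % 2 = 0
    · simp only [pvPStep1, hp, reduceIte]
      rw [show pvDiag n m = pvSeg0 m by
        unfold pvDiag; rw [if_pos (show m < n by omega), if_pos hp]; rfl]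
      exact Prod.ext rfl (by omega)
    · simp only [pvPStep1, hp, reduceIte]
      rw [show pvDiag n m = pvSeg1 m by
        unfold pvDiag; rw [if_pos (show m < n by omega), if_neg hp]; rfl]
      exact Prod.ext rfl (by omega)

theorem fold2_flat (n : Nat) : ∀ m (P : List (Nat × Nat)),
    (List.range' 1 m).foldl (pvPStep2 n) (P, n % 2) =
      (P ++ (List.range' n m).flatMap (pvDiag n), (n + m) % 2) := by
  intro m
  induction m with
  | zero => intro P; simp
  | succ m ih =>
    intro P
    have h1 : List.range' 1 (m+1) = List.range' 1 m ++ [1 + m] := by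
      rw [List.range'_concat]; simp
    have h2 : List.range' n (m+1) = List.range' n m ++ [n + m] := by
      rw [List.range'_concat]; simp
    rw [h1, List.foldl_append, ih, List.foldl_cons, List.foldl_nil, h2,
      List.flatMap_append, List.flatMap_cons, List.flatMap_nil, List.append_nil]
    have hdiag2 : (n + m) % 2 = 0 → pvDiag n (n + m) = pvSeg2 n (1 + m) := by
      intro hp
      unfold pvDiag
      rw [if_neg (by omega : ¬ (n + m < n)), if_pos hp,
        show n + m - n + 1 = 1 + m by omega]
      rfl
    have hdiag3 : ¬ (n + m) % 2 = 0 → pvDiag n (n + m) = pvSeg3 n (1 + m) := by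
      intro hp
      unfold pvDiag
      rw [if_neg (by omega : ¬ (n + m < n)), if_neg hp,
        show n + m - n + 1 = 1 + m by omega]
      rfl
    by_cases hp : (n + m) % 2 = 0
    · simp only [pvPStep2, hp, reduceIte]
      rw [hdiag2 hp]
      exact Prod.ext (by simp) (by omega)
    · simp only [pvPStep2, hp, reduceIte]
      rw [hdiag3 hp]
      exact Prod.ext (by simp) (by omega)

theorem path_flatMap (n : Nat) (hn : 1 ≤ n) :
    pvPath n = (List.range (2*n-1)).flatMap (pvDiag n) := by
  unfold pvPath
  rw [fold1_flat n n le_rfl, fold2_flat n (n-1), show 2*n-1 = n + (n-1) by omega]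
  have hsplit : List.range (n + (n-1)) = List.range' 0 n ++ List.range' n (n-1) := by
    rw [List.range_eq_range']
    have := @List.range'_append 0 n (n-1) 1
    simpa using this.symm
  rw [hsplit, List.flatMap_append, ← List.range_eq_range']

-- membership and distinctness of diagonal cells
theorem mem_diag (n s : Nat) (p : Nat × Nat) (hp : p ∈ pvDiag n s) :
    p.1 + p.2 = s ∧ p.1 < n ∧ p.2 < n := by
  unfold pvDiag at hp
  split_ifs at hp with h1 h2 h3
  · obtain ⟨j, hj, rfl⟩ := List.mem_map.mp hp
    rw [List.mem_range] at hj
    simp only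
    omega
  · obtain ⟨i, hi, rfl⟩ := List.mem_map.mp hp
    rw [List.mem_range] at hi
    simp only
    omega
  · obtain ⟨j, hj, rfl⟩ := List.mem_map.mp hp
    rw [List.mem_range'_1] at hj
    simp only
    omega
  · obtain ⟨i, hi, rfl⟩ := List.mem_map.mp hp
    rw [List.mem_range'_1] at hi
    simp only
    omega

theorem diag_nodup (n s : Nat) : (pvDiag n s).Nodup := by
  unfold pvDiag
  split_ifs
  · exact List.Nodup.map (fun a b h => congrArg Prod.snd h) List.nodup_range
  · exact List.Nodup.map (fun a b h => congrArg Prod.fst h) List.nodup_range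
  · exact List.Nodup.map (fun a b h => congrArg Prod.snd h) List.nodup_range'
  · exact List.Nodup.map (fun a b h => congrArg Prod.fst h) List.nodup_range' 

-- counter / shape through wfoldR
theorem wfoldR_append (A : List (List Int)) (n : Nat) (ps qs : List (Nat × Nat)) (s) :
    wfoldR A n (ps ++ qs) s = wfoldR A n qs (wfoldR A n ps s) := by
  simp [wfoldR, List.foldl_append]

theorem wfoldR_snd (A : List (List Int)) (n : Nat) :
    ∀ (ps : List (Nat × Nat)) (B : List (List Int)) (c : Nat),
      (wfoldR A n ps (B, c)).2 = c + ps.length := by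
  intro ps
  induction ps with
  | nil => intro B c; simp [wfoldR]
  | cons p ps ih =>
    intro B c
    have : wfoldR A n (p :: ps) (B, c) =
        wfoldR A n ps (pvSet2 B p.1 p.2 (pvGet2 A (n-1 - c / n) (n-1 - c % n)), c + 1) := by
      simp [wfoldR]
    rw [this, ih]
    simp; omega

theorem wfoldR_len (A : List (List Int)) (n : Nat) :
    ∀ (ps : List (Nat × Nat)) (B : List (List Int)) (c : Nat),
      (wfoldR A n ps (B, c)).1.length = B.length := by
  intro ps
  induction ps with
  | nil => intro B c; simp [wfoldR]
  | cons p ps ih =>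
    intro B c
    have : wfoldR A n (p :: ps) (B, c) =
        wfoldR A n ps (pvSet2 B p.1 p.2 (pvGet2 A (n-1 - c / n) (n-1 - c % n)), c + 1) := by
      simp [wfoldR]
    rw [this, ih, len_set2]

theorem wfoldR_rowlen (A : List (List Int)) (n : Nat) :
    ∀ (ps : List (Nat × Nat)) (B : List (List Int)) (c r : Nat),
      ((wfoldR A n ps (B, c)).1.getD r []).length = (B.getD r []).length := by
  intro ps
  induction ps with
  | nil => intro B c r; simp [wfoldR]
  | cons p ps ih =>
    intro B c r
    have : wfoldR A n (p :: ps) (B, c) =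
        wfoldR A n ps (pvSet2 B p.1 p.2 (pvGet2 A (n-1 - c / n) (n-1 - c % n)), c + 1) := by
      simp [wfoldR]
    rw [this, ih, rowlen_set2]

theorem wfoldR_notmem (A : List (List Int)) (n : Nat) (i j : Nat) :
    ∀ (ps : List (Nat × Nat)) (B : List (List Int)) (c : Nat), (i, j) ∉ ps →
      pvGet2 (wfoldR A n ps (B, c)).1 i j = pvGet2 B i j := by
  intro ps
  induction ps with
  | nil => intro B c _; simp [wfoldR]
  | cons p ps ih =>
    intro B c hmem
    have hstep : wfoldR A n (p :: ps) (B, c) =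
        wfoldR A n ps (pvSet2 B p.1 p.2 (pvGet2 A (n-1 - c / n) (n-1 - c % n)), c + 1) := by
      simp [wfoldR]
    have hne : i ≠ p.1 ∨ j ≠ p.2 := by
      by_contra hc
      push_neg at hc
      apply hmem
      rw [show p = (i, j) from (Prod.ext hc.1 hc.2).symm]
      exact List.mem_cons_self
    rw [hstep, ih _ _ (fun h => hmem (List.mem_cons_of_mem _ h)),
      get2_set2_ne _ _ _ _ _ _ hne]

theorem wfoldR_get (A : List (List Int)) (n : Nat) (i j : Nat) :
    ∀ (ps : List (Nat × Nat)) (B : List (List Int)) (c t : Nat), ps.Nodup →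
      (∀ p ∈ ps, p.1 < n ∧ p.2 < n) → B.length = n →
      (∀ r, r < n → (B.getD r []).length = n) →
      ps[t]? = some (i, j) →
      pvGet2 (wfoldR A n ps (B, c)).1 i j =
        pvGet2 A (n - 1 - (c + t) / n) (n - 1 - (c + t) % n) := by
  intro ps
  induction ps with
  | nil => intro B c t _ _ _ _ hget; simp at hget
  | cons p ps ih =>
    intro B c t hnd hmem hB hrow hget
    obtain ⟨hpnot, hnd'⟩ := List.nodup_cons.mp hnd
    have hstep : wfoldR A n (p :: ps) (B, c) =
        wfoldR A n ps (pvSet2 B p.1 p.2 (pvGet2 A (n-1 - c / n) (n-1 - c % n)), c + 1) := by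
      simp [wfoldR]
    cases t with
    | zero =>
      have hp : p = (i, j) := by simpa using hget
      subst hp
      rw [hstep, wfoldR_notmem A n i j ps _ _ hpnot]
      have hi : i < B.length := by rw [hB]; exact (hmem (i, j) List.mem_cons_self).1
      have hj : j < (B.getD i []).length := by
        rw [hrow i (by rw [← hB]; exact hi)]
        exact (hmem (i, j) List.mem_cons_self).2
      rw [get2_set2_self B i j _ hi hj]
      norm_num
    | succ u =>
      have hget' : ps[u]? = some (i, j) := by simpa using hget
      rw [hstep, ih _ (c+1) u hnd' (fun q hq => hmem q (List.mem_cons_of_mem _ hq))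
        (by rw [len_set2, hB]) (fun r hr => by rw [rowlen_set2]; exact hrow r hr) hget']
      rw [show c + (u + 1) = c + 1 + u by omega]

-- triangular-number closed forms for the segment-length prefix sums
theorem base_lt (n : Nat) : ∀ s, s ≤ n → 2 * pvBase n s = s * (s + 1) := by
  intro s
  induction s with
  | zero => intro _; simp [pvBase]
  | succ s ih =>
    intro hs
    have hstep : pvBase n (s+1) = pvBase n s + pvDlen n s := by
      simp [pvBase, List.range_succ]
    rw [hstep, pvDlen, if_pos (by omega : s < n), Nat.mul_add, ih (by omega)]
    ring

theorem base_ge (n : Nat) : ∀ m, m ≤ n →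
    2 * pvBase n (n + m) + m * (m + 1) = n * (n + 1) + 2 * (m * n) := by
  intro m
  induction m with
  | zero => intro _; simpa using base_lt n n le_rfl
  | succ m ih =>
    intro hm
    have hstep : pvBase n (n + (m+1)) = pvBase n (n + m) + pvDlen n (n + m) := by
      rw [show n + (m+1) = (n + m) + 1 by omega]
      simp [pvBase, List.range_succ]
    have hd : pvDlen n (n + m) = n - (m + 1) := by
      rw [pvDlen, if_neg (by omega : ¬ (n + m < n))]
      congr 1
      omega
    have ihm := ih (by omega)
    rw [hstep, hd]
    zify [show m + 1 ≤ n from hm] at ihm ⊢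
    linear_combination ihm

-- the rank formula indexes the diagonal decomposition correctly
theorem diag_rank (n i j : Nat) (hi : i < n) (hj : j < n) :
    ∃ off, (pvDiag n (i + j))[off]? = some (i, j) ∧
      pvBase n (i + j) + off = pvRank n i j := by
  by_cases hsn : i + j < n
  · have hb := base_lt n (i + j) (by omega)
    by_cases hp : (i + j) % 2 = 0
    · refine ⟨j, ?_, ?_⟩
      · unfold pvDiag
        rw [if_pos hsn, if_pos hp, List.getElem?_map,
          List.getElem?_range (by omega : j < i + j + 1)]
        simp only [Option.map_some]
        rw [show i + j - j = i by omega]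
      · simp only [pvRank]
        rw [if_pos hsn, if_pos hp]
        generalize hM : (i + j) * (i + j + 1) = M at hb ⊢
        omega
    · refine ⟨i, ?_, ?_⟩
      · unfold pvDiag
        rw [if_pos hsn, if_neg hp, List.getElem?_map,
          List.getElem?_range (by omega : i < i + j + 1)]
        simp only [Option.map_some]
        rw [show i + j - i = j by omega]
      · simp only [pvRank]
        rw [if_pos hsn, if_neg hp]
        generalize hM : (i + j) * (i + j + 1) = M at hb ⊢
        omega
  · have hb := base_ge n (i + j - n) (by omega)
    rw [show n + (i + j - n) = i + j by omega] at hb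
    have e1 : (n * (n + 1)) % 2 = 0 := Nat.even_iff.mp (Nat.even_mul_succ_self n)
    have e2 : ((i + j - n) * (i + j - n + 1)) % 2 = 0 :=
      Nat.even_iff.mp (Nat.even_mul_succ_self (i + j - n))
    by_cases hp : (i + j) % 2 = 0
    · refine ⟨j - (i + j - n + 1), ?_, ?_⟩
      · simp only [pvDiag, hsn, hp, reduceIte, if_false]
        rw [List.getElem?_map, List.getElem?_range'
          (by omega : j - (i + j - n + 1) < n - (i + j - n + 1))]
        simp only [Option.map_some]
        rw [show i + j - n + 1 + 1 * (j - (i + j - n + 1)) = j by omega]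
        rw [show n - 1 - (j - (i + j - n + 1)) = i by omega]
      · simp only [pvRank]
        rw [if_neg hsn, if_pos hp, Nat.add_sub_cancel]
        generalize hP : n * (n + 1) = P at hb e1 ⊢
        generalize hQ : (i + j - n) * n = Q at hb ⊢
        generalize hR : (i + j - n) * (i + j - n + 1) = R at hb e2 ⊢
        omega
    · refine ⟨i - (i + j - n + 1), ?_, ?_⟩
      · simp only [pvDiag, hsn, hp, reduceIte, if_false]
        rw [List.getElem?_map, List.getElem?_range'
          (by omega : i - (i + j - n + 1) < n - (i + j - n + 1))]
        simp only [Option.map_some]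
        rw [show i + j - n + 1 + 1 * (i - (i + j - n + 1)) = i by omega]
        rw [show n - 1 - (i - (i + j - n + 1)) = j by omega]
      · simp only [pvRank]
        rw [if_neg hsn, if_neg hp, Nat.add_sub_cancel]
        generalize hP : n * (n + 1) = P at hb e1 ⊢
        generalize hQ : (i + j - n) * n = Q at hb ⊢
        generalize hR : (i + j - n) * (i + j - n + 1) = R at hb e2 ⊢
        omega

theorem flat_len (n s : Nat) :
    ((List.range s).flatMap (pvDiag n)).length = pvBase n s := by
  rw [List.length_flatMap, pvBase]
  congr 1
  apply List.map_congr_left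
  intro t _
  exact diag_length n t

-- the A-side grid cell equals Source B's closed-form cell
theorem grid_cell (A : List (List Int)) (hn : 1 ≤ A.length) (i j : Nat)
    (hi : i < A.length) (hj : j < A.length) :
    pvGet2 (wfoldR A A.length (pvPath A.length)
      (List.replicate A.length (List.replicate A.length 0), 0)).1 i j =
    pvCell A A.length i j := by
  obtain ⟨off, hget, hrank⟩ := diag_rank A.length i j hi hj
  rw [path_flatMap A.length hn]
  have h1 : List.range' 0 (2*A.length-1) =
      List.range' 0 (i+j) ++ List.range' (i+j) (2*A.length-1-(i+j)) := by
    have h := @List.range'_append 0 (i+j) (2*A.length-1-(i+j)) 1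
    rw [show (i+j) + (2*A.length-1-(i+j)) = 2*A.length-1 by omega] at h
    simpa using h.symm
  have h2 : List.range' (i+j) (2*A.length-1-(i+j)) =
      (i+j) :: List.range' (i+j+1) (2*A.length-2-(i+j)) := by
    rw [show 2*A.length-1-(i+j) = (2*A.length-2-(i+j)) + 1 by omega, List.range'_succ]
  rw [List.range_eq_range', h1, h2, List.flatMap_append, List.flatMap_cons,
    ← List.range_eq_range', wfoldR_append, wfoldR_append]
  have hnot : (i, j) ∉
      (List.range' (i+j+1) (2*A.length-2-(i+j))).flatMap (pvDiag A.length) := by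
    intro hmem
    obtain ⟨t, ht, hpd⟩ := List.mem_flatMap.mp hmem
    have hsum := (mem_diag _ _ _ hpd).1
    rw [List.mem_range'_1] at ht
    simp only at hsum
    omega
  have hst1len :
      (wfoldR A A.length ((List.range (i+j)).flatMap (pvDiag A.length))
        (List.replicate A.length (List.replicate A.length 0), 0)).1.length = A.length := by
    rw [wfoldR_len]; simp
  have hst1row : ∀ r, r < A.length →
      ((wfoldR A A.length ((List.range (i+j)).flatMap (pvDiag A.length))
        (List.replicate A.length (List.replicate A.length 0), 0)).1.getD r []).length
        = A.length := by
    intro r hr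
    rw [wfoldR_rowlen]
    simp [List.getD_eq_getElem?_getD, List.getElem?_replicate, hr]
  have hst1c :
      (wfoldR A A.length ((List.range (i+j)).flatMap (pvDiag A.length))
        (List.replicate A.length (List.replicate A.length 0), 0)).2
        = pvBase A.length (i+j) := by
    rw [wfoldR_snd, flat_len]; omega
  have hmid := wfoldR_get A A.length i j (pvDiag A.length (i+j))
    (wfoldR A A.length ((List.range (i+j)).flatMap (pvDiag A.length))
      (List.replicate A.length (List.replicate A.length 0), 0)).1
    (wfoldR A A.length ((List.range (i+j)).flatMap (pvDiag A.length))
      (List.replicate A.length (List.replicate A.length 0), 0)).2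
    off (diag_nodup _ _) (fun p hp => (mem_diag _ _ p hp).2) hst1len hst1row hget
  rw [wfoldR_notmem A A.length i j _ _ _ hnot]
  refine Eq.trans hmid ?_
  rw [hst1c, hrank]
  rfl

theorem get2_eq_getElem (M : List (List Int)) (i j : Nat)
    (hi : i < M.length) (hj : j < M[i].length) :
    pvGet2 M i j = M[i][j] := by
  simp [pvGet2, List.getD_eq_getElem?_getD, List.getElem?_eq_getElem, hi, hj]

theorem path_len (n : Nat) (hn : 1 ≤ n) : (pvPath n).length = n * n := by
  rw [path_flatMap n hn, flat_len]
  have hb := base_ge n (n-1) (by omega)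
  rw [show n + (n-1) = 2*n-1 by omega, show n - 1 + 1 = n by omega] at hb
  rw [show n * (n + 1) = n*n + n by ring] at hb
  rw [show (n-1) * n = n*n - n from by rw [Nat.sub_mul, one_mul]] at hb
  have hNn : n ≤ n * n := Nat.le_mul_of_pos_left n (by omega)
  generalize hN : n * n = N at hb hNn ⊢
  omega

-- ===== VERDICT =====
theorem revhelical_rev_spec : Claim_equal_revhelical_rev := by
  intro A _ hpre
  have hn : 1 ≤ A.length := by
    cases A with
    | nil => exact absurd rfl hpre.1
    | cons x xs => simp
  unfold Spec_revhelical_rev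
  have hG : revhelical_rev A = (wfoldR A A.length (pvPath A.length)
      (List.replicate A.length (List.replicate A.length 0), 0)).1 := by
    rw [show revhelical_rev A = pvAHelical (pvBuildRot A).1 from rfl,
      helical_eq_wfold, buildRot_len A hn]
    rw [wfold_eq_wfoldR (pvBuildRot A).1 A A.length (pvPath A.length) _ 0
      (fun t h0 ht => by
        apply buildRot_read A hn
        rw [Nat.zero_add, path_len _ hn] at ht
        exact ht)]
  rw [hG]
  have hGlen : (wfoldR A A.length (pvPath A.length)
      (List.replicate A.length (List.replicate A.length 0), 0)).1.length = A.length := by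
    rw [wfoldR_len]; simp
  have hGrow : ∀ r, r < A.length →
      ((wfoldR A A.length (pvPath A.length)
        (List.replicate A.length (List.replicate A.length 0), 0)).1.getD r []).length
        = A.length := by
    intro r hr
    rw [wfoldR_rowlen]
    simp [List.getD_eq_getElem?_getD, List.getElem?_replicate, hr]
  apply List.ext_getElem
  · rw [hGlen]; simp [revhelical_rev_alt]
  · intro r hr1 hr2
    have hrn : r < A.length := by rw [hGlen] at hr1; exact hr1
    have hrowlen : (wfoldR A A.length (pvPath A.length)
        (List.replicate A.length (List.replicate A.length 0), 0)).1[r].length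
        = A.length := by
      have := hGrow r hrn
      rwa [List.getD_eq_getElem?_getD, List.getElem?_eq_getElem hr1,
        Option.getD_some] at this
    apply List.ext_getElem
    · rw [hrowlen]
      simp [revhelical_rev_alt]
    · intro c hc1 hc2
      have hcn : c < A.length := by rw [hrowlen] at hc1; exact hc1
      rw [← get2_eq_getElem _ _ _ hr1 hc1, grid_cell A hn r c hrn hcn]
      simp [revhelical_rev_alt, hrn, hcn]
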